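-- pv_equiv track=rewrite | github.com/namhyeonh0/Algorithm | 프로그래머스/unrated/135808. 과일 장수/과일 장수.py | solution
-- ===== SOURCE A (Python) =====
-- def solution(k, m, score):
--     score.sort()
--     n = len(score) // m
--     s = 0
--     for i in range(n):
--         l = score[len(score)-m-m*i:len(score)-m*i]
--         s += min(l) * m
--     return s
-- ===== SOURCE B (Python) =====
-- def solution(k, m, score):
--     # Frequency-count the scores, walk the distinct values from largest to
--     # smallest, and for each value count arithmetically how many kept group
--     # boundaries (positions m-1, 2m-1, ... in the descending order) fall into
--     # its run -- no sort of the full list, no per-group slicing or min().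
--     if m <= 0:
--         return 0
--     cnt = {}
--     for s in score:
--         cnt[s] = cnt.get(s, 0) + 1
--     limit = (len(score) // m) * m
--     total = 0
--     pos = 0
--     for v in sorted(cnt, reverse=True):
--         c = cnt[v]
--         total += v * (min(pos + c, limit) // m - min(pos, limit) // m)
--         pos += c
--     return m * total
-- ===== Notes on version B (the rewrite author's own statement) =====
-- stated objective: alternative
-- what changed: B never sorts the full list and never slices groups: it builds a value->frequency dict in one pass, sorts only the distinct values descending, and for each value computes arithmetically (two floor divisions) how many kept group boundaries fall inside its run of the descending order.
-- outside the precondition, e.g. on solution(3, 0, [1, 2]): A raises ZeroDivisionError, B returns 0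
import Mathlib
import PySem

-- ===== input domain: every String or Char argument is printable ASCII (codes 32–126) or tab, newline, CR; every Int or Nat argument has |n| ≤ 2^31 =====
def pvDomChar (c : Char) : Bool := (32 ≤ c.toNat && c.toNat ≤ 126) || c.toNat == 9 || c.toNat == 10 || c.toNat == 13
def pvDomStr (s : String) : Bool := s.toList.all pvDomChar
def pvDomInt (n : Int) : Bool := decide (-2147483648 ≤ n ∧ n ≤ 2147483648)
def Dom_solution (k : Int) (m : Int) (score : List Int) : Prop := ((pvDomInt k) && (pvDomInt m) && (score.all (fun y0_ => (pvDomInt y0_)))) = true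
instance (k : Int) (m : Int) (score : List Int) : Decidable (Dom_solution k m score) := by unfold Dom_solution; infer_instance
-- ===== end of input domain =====

-- B replaces the full sort + per-group slice/min of A by a frequency dict over the
-- distinct values, a sort of the distinct values only, and a per-value arithmetic count
-- of kept group boundaries; note A sorts `score` in place — equivalence is about the return value.


-- ===== PORT A =====
def solution (k : Int) (m : Int) (score : List Int) : Int :=
  let ss := PySem.List.sorted score (fun x => x) false
  let n := PySem.Int.floordiv (ss.length : Int) m
  (PySem.List.pyRange 0 n 1).foldl (fun s i =>
    let l := PySem.List.slice ss (some ((ss.length : Int) - m - m * i)) (some ((ss.length : Int) - m * i))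
    -- min([]) raises ValueError; Pre_ (m ≠ 0) keeps the slice nonempty, the default is unreachable
    s + ((PySem.List.min? l (fun y => y)).getD 0) * m) 0

-- ===== PORT B =====
def solution_alt (k : Int) (m : Int) (score : List Int) : Int :=
  if m ≤ 0 then 0
  else
    let cnt := score.foldl (fun d s => d.insert s (d.getD s 0 + 1)) (PySem.Dict.empty)
    let limit := (PySem.Int.floordiv (score.length : Int) m) * m
    let res := (PySem.List.sorted cnt.keys (fun x => x) true).foldl
      (fun (acc : Int × Int) v =>
        let c := cnt.getD v 0
        (acc.1 + v * (PySem.Int.floordiv (min (acc.2 + c) limit) m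
                      - PySem.Int.floordiv (min acc.2 limit) m),
         acc.2 + c)) (0, 0)
    m * res.1

-- ===== PRECONDITION & SPEC =====
-- Pre_ excludes exactly m = 0, on which Python A raises ZeroDivisionError (len(score) // m).
def Pre_solution (k : Int) (m : Int) (score : List Int) : Prop := m ≠ 0
instance (k : Int) (m : Int) (score : List Int) : Decidable (Pre_solution k m score) := by unfold Pre_solution; infer_instance
def pvWitness_solution : Int × Int × List Int := (3, 2, [1, 2, 3, 1, 2])

def Spec_solution (k : Int) (m : Int) (score : List Int) (out : Int) : Prop := out = solution_alt k m score
instance (k : Int) (m : Int) (score : List Int) (out : Int) : Decidable (Spec_solution k m score out) := by unfold Spec_solution; infer_instance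

-- ===== CLAIM (what is proved, stated in full; the proofs are below) =====
def Claim_equal_solution : Prop := ∀ (k : Int) (m : Int) (score : List Int), Dom_solution k m score → Pre_solution k m score → Spec_solution k m score (solution k m score)

-- ===== LEMMAS AND PROOFS =====

-- boundary sum: walking a list from absolute position p, add the elements sitting at
-- positions q with q < limit and (q+1) divisible by m (the kept group minima in descending order)
def bsum (m limit : Int) : Int → List Int → Int
  | _, [] => 0
  | p, x :: xs => (if p < limit ∧ (p + 1) % m = 0 then x else 0) + bsum m limit (p + 1) xs

lemma bsum_append (m limit : Int) (a b : List Int) : ∀ p : Int,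
    bsum m limit p (a ++ b) = bsum m limit p a + bsum m limit (p + a.length) b := by
  induction a with
  | nil => intro p; simp [bsum]
  | cons x t ih =>
      intro p
      simp only [List.cons_append, bsum, ih (p + 1), List.length_cons]
      push_cast
      ring_nf

-- one division step: (p+1)/m - p/m is the boundary indicator
lemma ediv_step (m p : Int) (hm : 0 < m) :
    (p + 1) / m - p / m = (if (p + 1) % m = 0 then (1 : Int) else 0) := by
  have hr0 : 0 ≤ p % m := Int.emod_nonneg p (by omega)
  have hrm : p % m < m := Int.emod_lt_of_pos p hm
  have hp : m * (p / m) + p % m = p := Int.ediv_add_emod p m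
  set r := p % m with hrdef
  have h1 : p + 1 = (r + 1) + m * (p / m) := by omega
  have hdiv : (p + 1) / m = (r + 1) / m + p / m := by
    rw [h1, Int.add_mul_ediv_left _ _ (by omega : m ≠ 0)]
  have hmod : (p + 1) % m = (r + 1) % m := by
    rw [h1, Int.add_mul_emod_self_left]
  by_cases hcase : r + 1 = m
  · have : (r + 1) / m = 1 := by rw [hcase]; exact Int.ediv_self (by omega)
    have h2 : (r + 1) % m = 0 := by rw [hcase]; exact Int.emod_self
    rw [hdiv, this, hmod, h2]
    simp
  · have hlt : r + 1 < m := by omega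
    have : (r + 1) / m = 0 := Int.ediv_eq_zero_of_lt (by omega) hlt
    have h2 : (r + 1) % m = r + 1 := Int.emod_eq_of_lt (by omega) hlt
    rw [hdiv, this, hmod, h2]
    simp
    omega

-- the boundary sum over a constant run is the closed two-division formula used by B
lemma bsum_replicate (m limit v : Int) (hm : 0 < m) : ∀ (c : Nat) (p : Int),
    bsum m limit p (List.replicate c v)
      = v * (min (p + (c : Int)) limit / m - min p limit / m) := by
  intro c
  induction c with
  | zero => intro p; simp [bsum]
  | succ c ih =>
      intro p
      rw [List.replicate_succ]
      simp only [bsum, ih (p + 1)]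
      have hstep : min (p + 1) limit / m - min p limit / m
          = (if p < limit ∧ (p + 1) % m = 0 then (1 : Int) else 0) := by
        by_cases hp : p < limit
        · rw [min_eq_left (by omega), min_eq_left (by omega), ediv_step m p hm]
          simp [hp]
        · rw [min_eq_right (by omega), min_eq_right (by omega)]
          simp [hp]
      have harr : p + ((c : Nat) + 1 : Nat) = (p + 1) + (c : Int) := by push_cast; ring
      rw [harr]
      set A := min (p + 1 + (c : Int)) limit / m with hA
      set B := min (p + 1) limit / m with hB
      set C := min p limit / m with hC
      split_ifs with h
      · rw [if_pos h] at hstep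
        have : C = B - 1 := by linarith
        rw [this]; ring
      · rw [if_neg h] at hstep
        have : C = B := by linarith
        rw [this]; ring

-- B's fold over the distinct values computes the boundary sum of the expanded run list
lemma fold_bsum (m limit : Int) (hm : 0 < m) (g : Int → Nat) : ∀ (ks : List Int) (T p : Int),
    ks.foldl (fun (acc : Int × Int) v =>
        (acc.1 + v * (min (acc.2 + (g v : Int)) limit / m - min acc.2 limit / m),
         acc.2 + (g v : Int))) (T, p)
      = (T + bsum m limit p (ks.flatMap fun v => List.replicate (g v) v),
         p + ((ks.map fun v => ((g v : Int))).sum)) := by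
  intro ks
  induction ks with
  | nil => intro T p; simp [bsum]
  | cons v t ih =>
      intro T p
      simp only [List.foldl_cons, List.flatMap_cons, List.map_cons, List.sum_cons, ih]
      rw [bsum_append, List.length_replicate, bsum_replicate m limit v hm (g v) p]
      simp only [Prod.mk.injEq]
      exact ⟨by ring, by ring⟩

-- count of an element in a flatMap of replicates over a nodup key list
lemma count_flat (g : Int → Nat) (a : Int) : ∀ (ks : List Int), ks.Nodup →
    (ks.flatMap fun v => List.replicate (g v) v).count a = if a ∈ ks then g a else 0 := by
  intro ks
  induction ks with
  | nil => simp
  | cons v t ih =>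
      intro hnd
      rw [List.flatMap_cons, List.count_append, List.count_replicate, ih hnd.of_cons]
      by_cases hav : a = v
      · subst hav
        have : a ∉ t := (List.nodup_cons.mp hnd).1
        simp [this]
      · simp [hav, Ne.symm hav]

-- bsum as an indicator sum over positions
lemma bsum_eq_sum (m limit : Int) : ∀ (l : List Int) (p : Int),
    bsum m limit p l
      = ((List.range l.length).map (fun (j : Nat) =>
          if p + (j : Int) < limit ∧ (p + (j : Int) + 1) % m = 0 then l.getD j 0 else 0)).sum := by
  intro l
  induction l with
  | nil => intro p; simp [bsum]
  | cons x t ih =>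
      intro p
      rw [List.length_cons, List.range_succ_eq_map, List.map_cons, List.sum_cons, List.map_map]
      simp only [bsum, ih (p + 1)]
      congr 1
      · simp
      · apply congrArg
        apply List.map_congr_left
        intro j _
        simp only [Function.comp_apply, Nat.succ_eq_add_one]
        have h1 : p + ((j + 1 : Nat) : Int) = (p + 1) + (j : Int) := by push_cast; ring
        rw [h1, List.getD_cons_succ]

-- list-sum over range equals Finset sum
lemma list_sum_range (f : Nat → Int) : ∀ n : Nat,
    ((List.range n).map f).sum = ∑ j ∈ Finset.range n, f j := by
  intro n
  induction n with
  | zero => simp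
  | succ n ih => rw [List.range_succ, List.map_append, List.sum_append, Finset.sum_range_succ, ih]; simp

-- the positions below N*M with (j+1) divisible by M are exactly M-1 + M*k, k < N
lemma filter_eq_image (M N L : Nat) (hM : 0 < M) (hNM : N * M ≤ L) :
    (Finset.range L).filter (fun j => j < N * M ∧ (j + 1) % M = 0)
      = (Finset.range N).image (fun k => M - 1 + M * k) := by
  have hcomm : M * N = N * M := Nat.mul_comm M N
  ext j
  simp only [Finset.mem_filter, Finset.mem_image, Finset.mem_range]
  constructor
  · rintro ⟨_, hjNM, hmod⟩
    obtain ⟨t, ht⟩ := Nat.dvd_of_mod_eq_zero hmod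
    have ht1 : 1 ≤ t := by
      rcases Nat.eq_zero_or_pos t with h0 | h0
      · rw [h0, Nat.mul_zero] at ht; omega
      · omega
    obtain ⟨s, rfl⟩ : ∃ s, t = s + 1 := ⟨t - 1, by omega⟩
    have hms : M * (s + 1) = M * s + M := by ring
    have h2 : M * (s + 1) ≤ M * N := by omega
    have h3 : s + 1 ≤ N := Nat.le_of_mul_le_mul_left h2 hM
    exact ⟨s, by omega, by omega⟩
  · rintro ⟨k, hk, rfl⟩
    have h1 : M * (k + 1) ≤ M * N := Nat.mul_le_mul_left M (by omega)
    have hms : M * (k + 1) = M * k + M := by ring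
    refine ⟨by omega, by omega, ?_⟩
    have h4 : M - 1 + M * k + 1 = M * (k + 1) := by omega
    rw [h4, Nat.mul_mod_right]

-- min of a nonempty contiguous segment of an ascending list is its first element
lemma min_sorted_seg (xs : List Int) (h : xs.Pairwise (· ≤ ·)) (a c : Nat)
    (ha : a < xs.length) (hc : 0 < c) :
    ((PySem.List.min? ((xs.drop a).take c) (fun y => y)).getD 0) = xs[a] := by
  obtain ⟨c', rfl⟩ := Nat.exists_eq_succ_of_ne_zero (Nat.pos_iff_ne_zero.mp hc)
  rw [List.drop_eq_getElem_cons ha, List.take_succ_cons, PySem.List.min?_id_cons]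
  have hpw : (xs.drop a).Pairwise (· ≤ ·) := h.sublist (List.drop_sublist a xs)
  rw [List.drop_eq_getElem_cons ha] at hpw
  have hhead : ∀ y ∈ xs.drop (a + 1), xs[a] ≤ y := (List.pairwise_cons.mp hpw).1
  have hle := (PySem.List.foldl_min_le ((xs.drop (a+1)).take c') xs[a]).1
  rcases PySem.List.foldl_min_mem ((xs.drop (a+1)).take c') xs[a] with he | hm
  · simp [he]
  · have := hhead _ (List.mem_of_mem_take hm)
    simp [le_antisymm hle this]

theorem solution_spec : Claim_equal_solution := by
  intro k m score _ hpre
  unfold Spec_solution solution solution_alt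
  simp only []
  set ss := PySem.List.sorted score (fun x => x) false with hss
  set desc := PySem.List.sorted score (fun x => x) true with hdesc
  have hlss : ss.length = score.length :=
    (PySem.List.sorted_perm score (fun x => x) false).length_eq
  have hldesc : desc.length = score.length :=
    (PySem.List.sorted_perm score (fun x => x) true).length_eq
  rcases lt_or_gt_of_ne hpre with hm | hm
  · -- m < 0: A's range is empty, B takes the m ≤ 0 branch
    have hn : PySem.Int.floordiv (ss.length : Int) m ≤ 0 := by
      have hd := PySem.Int.floordiv_mul_add_mod (ss.length : Int) m
      have hb := PySem.Int.mod_neg_bounds (ss.length : Int) hm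
      set q := PySem.Int.floordiv (ss.length : Int) m
      by_contra hq
      push_neg at hq
      have : q * m ≤ 1 * m := by
        apply mul_le_mul_of_nonpos_right _ (le_of_lt hm)
        omega
      have hlen : (0 : Int) ≤ (ss.length : Int) := Int.natCast_nonneg _
      nlinarith
    rw [PySem.List.pyRange_one_eq_nil hn]
    simp [le_of_lt hm]
  · -- m > 0
    rw [if_neg (by omega), hlss]
    simp only [PySem.Int.floordiv_eq_ediv_of_pos hm]
    set L : Int := (score.length : Int) with hL
    have hLnn : (0 : Int) ≤ L := by rw [hL]; exact Int.natCast_nonneg _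
    set n := L / m with hn
    have hn0 : 0 ≤ n := by rw [hn]; exact Int.ediv_nonneg hLnn (le_of_lt hm)
    have hnm : n * m ≤ L := by
      rw [hn]
      have h1 := Int.emod_nonneg L (by omega : m ≠ 0)
      have h2 := Int.mul_ediv_add_emod L m
      have h3 : L / m * m = m * (L / m) := mul_comm _ _
      omega
    set N := n.toNat with hN
    set M := m.toNat with hM
    have hMi : (M : Int) = m := Int.toNat_of_nonneg (le_of_lt hm)
    have hNi : (N : Int) = n := Int.toNat_of_nonneg hn0
    have hMpos : 0 < M := by omega
    have hNM : N * M ≤ score.length := by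
      have h1 : ((N * M : Nat) : Int) ≤ L := by push_cast; rw [hNi, hMi]; exact hnm
      rw [hL] at h1
      exact_mod_cast h1
    have hnmNM : n * m = ((N * M : Nat) : Int) := by push_cast; rw [hNi, hMi]
    -- descending sort is the reverse of the ascending one
    have hrev : desc = ss.reverse := by
      have h1 : desc.reverse.Pairwise (fun a b => (a : Int) ≤ b) := by
        rw [List.pairwise_reverse]
        exact PySem.List.sorted_pairwise_rev score (fun x => x)
      have h2 : ss.Pairwise (fun a b => (a : Int) ≤ b) :=
        PySem.List.sorted_pairwise score (fun x => x)
      have hperm : desc.reverse.Perm ss :=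
        ((List.reverse_perm desc).trans (PySem.List.sorted_perm score (fun x => x) true)).trans
          (PySem.List.sorted_perm score (fun x => x) false).symm
      have := PySem.List.eq_of_perm_of_pairwise_le_of_injective (l₁ := desc.reverse) (l₂ := ss)
        (fun x => x) (fun _ _ h => h) hperm h1 h2
      rw [← this, List.reverse_reverse]
    -- B: the counter loop is Counter(score); its keys are the distinct values
    rw [PySem.Dict.foldl_insert_getD_add_one_eq_counter score, PySem.Dict.keys_counter]
    simp only [PySem.Dict.getD_counter]
    set ks := PySem.List.sorted (PySem.Set.ofList score) (fun x => x) true with hks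
    rw [fold_bsum m (n * m) hm (fun v => List.count v score) ks 0 0]
    simp only [zero_add]
    -- the run expansion of the distinct values is exactly desc
    have hksnd : ks.Nodup := by
      rw [hks]
      exact ((PySem.List.sorted_perm _ (fun x => x) true).nodup_iff).mpr
        (PySem.Set.nodup_ofList score)
    have hFdesc : (ks.flatMap fun v => List.replicate (List.count v score) v) = desc := by
      set F := ks.flatMap fun v => List.replicate (List.count v score) v with hF
      have hFperm : F.Perm score := by
        rw [List.perm_iff_count]
        intro a
        rw [hF, count_flat (fun v => List.count v score) a ks hksnd]
        by_cases ha : a ∈ ks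
        · simp [ha]
        · have : a ∉ score := by
            intro hmem
            exact ha (by rw [hks, PySem.List.mem_sorted, PySem.Set.mem_ofList]; exact hmem)
          simp [ha, List.count_eq_zero.mpr this]
      have hFpw : F.Pairwise (fun a b => b ≤ a) := by
        rw [hF, List.pairwise_flatMap]
        constructor
        · intro a _
          rw [List.pairwise_replicate]
          right; exact le_rfl
        · have hkpw : ks.Pairwise (fun a b => b ≤ a) := by
            rw [hks]; exact PySem.List.sorted_pairwise_rev _ (fun x => x)
          refine hkpw.imp_of_mem ?_
          intro a b _ _ hab x hx y hy
          rw [List.eq_of_mem_replicate hx, List.eq_of_mem_replicate hy]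
          exact hab
      have h1 : F.reverse.Pairwise (fun a b => (a : Int) ≤ b) := by
        rw [List.pairwise_reverse]; exact hFpw
      have h2 : desc.reverse.Pairwise (fun a b => (a : Int) ≤ b) := by
        rw [List.pairwise_reverse]
        exact PySem.List.sorted_pairwise_rev score (fun x => x)
      have hperm : F.reverse.Perm desc.reverse := by
        refine ((List.reverse_perm F).trans ?_).trans (List.reverse_perm desc).symm
        exact hFperm.trans (PySem.List.sorted_perm score (fun x => x) true).symm
      have := PySem.List.eq_of_perm_of_pairwise_le_of_injective (l₁ := F.reverse)
        (l₂ := desc.reverse) (fun x => x) (fun _ _ h => h) hperm h1 h2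
      exact List.reverse_injective this
    rw [hFdesc]
    -- the boundary sum over desc is the sum of the block-boundary elements
    have hbridge : bsum m (n * m) 0 desc
        = ((List.range N).map (fun i => desc.getD (M - 1 + M * i) 0)).sum := by
      rw [bsum_eq_sum, hldesc, list_sum_range, list_sum_range]
      have hcondsum : ∀ j ∈ Finset.range score.length,
          (if (0 : Int) + (j : Int) < n * m ∧ ((0 : Int) + (j : Int) + 1) % m = 0
             then desc.getD j 0 else 0)
          = (if j < N * M ∧ (j + 1) % M = 0 then desc.getD j 0 else 0) := by
        intro j _
        have e1 : ((0 : Int) + (j : Int) < n * m) ↔ (j < N * M) := by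
          rw [zero_add, hnmNM]; exact_mod_cast Iff.rfl
        have e2 : (((0 : Int) + (j : Int) + 1) % m = 0) ↔ ((j + 1) % M = 0) := by
          rw [zero_add, ← hMi]
          have : ((j : Int) + 1) % (M : Int) = (((j + 1) % M : Nat) : Int) := by
            rw [Int.natCast_mod]; push_cast; ring_nf
          rw [this]
          exact_mod_cast Iff.rfl
        rw [if_congr (and_congr e1 e2) rfl rfl]
      rw [Finset.sum_congr rfl hcondsum, ← Finset.sum_filter,
          filter_eq_image M N score.length hMpos hNM,
          Finset.sum_image (by
            intro k1 _ k2 _ h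
            have h' : M - 1 + M * k1 = M - 1 + M * k2 := h
            have : M * k1 = M * k2 := by omega
            exact Nat.eq_of_mul_eq_mul_left hMpos this)]
    rw [hbridge]
    -- A: each slice minimum is the block-boundary element of desc
    rw [PySem.List.pyRange_one, List.foldl_map, PySem.List.foldl_add, zero_add]
    simp only [zero_add, sub_zero, ← hN]
    have hpw : ss.Pairwise (· ≤ ·) := PySem.List.sorted_pairwise score (fun x => x)
    have hterm : ∀ y ∈ List.range N,
        ((PySem.List.min? (PySem.List.slice ss (some (L - m - m * (y : Int)))
            (some (L - m * (y : Int)))) (fun y => y)).getD 0) * m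
        = desc.getD (M - 1 + M * y) 0 * m := by
      intro y hy
      have hiN : (y : Int) < n := by
        have := List.mem_range.mp hy
        omega
      set t : Int := L - m * ((y : Int) + 1) with ht
      have ht0 : 0 ≤ t := by
        have h1 : (y : Int) + 1 ≤ n := by omega
        have := mul_le_mul_of_nonneg_left h1 (le_of_lt hm)
        rw [ht]; nlinarith
      have htL : t + m ≤ L := by
        rw [ht]; nlinarith [mul_nonneg (le_of_lt hm) (Int.natCast_nonneg y)]
      have hteq : L - m - m * (y : Int) = t := by rw [ht]; ring
      have htm : L - m * (y : Int) = t + m := by rw [ht]; ring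
      rw [hteq, htm,
          PySem.List.slice_of_nonneg ss ht0 (by omega) (by rw [hlss, ← hL]; omega)
            (by rw [hlss, ← hL]; omega),
          min_sorted_seg ss hpw t.toNat ((t + m).toNat - t.toNat)
            (by rw [hlss]; omega) (by omega)]
      congr 1
      have hmy : M * (y + 1) = M * y + M := by ring
      have hMN : M * (y + 1) ≤ M * N := Nat.mul_le_mul_left M (by omega)
      have hMNc : M * N = N * M := Nat.mul_comm M N
      have hidx : M - 1 + M * y < desc.length := by rw [hldesc]; omega
      rw [List.getD_eq_getElem desc 0 hidx]
      symm
      have h1 : M - 1 + M * y < ss.reverse.length := by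
        rw [List.length_reverse, hlss]; omega
      calc desc[M - 1 + M * y]'hidx
          = ss.reverse[M - 1 + M * y]'h1 := List.getElem_of_eq hrev _
        _ = ss[ss.length - 1 - (M - 1 + M * y)]'(by rw [hlss]; omega) := List.getElem_reverse _
        _ = ss[t.toNat]'(by rw [hlss]; omega) := by
              have key : ((M - 1 + M * y : Nat) : Int) = m * (y : Int) + m - 1 := by
                rw [← hMi]; push_cast; omega
              have ht' : t = L - (m * (y : Int) + m) := by rw [ht]; ring
              have hLs : L = (score.length : Int) := hL
              congr 1
              omega
    rw [List.map_congr_left hterm, List.sum_map_mul_right, mul_comm]
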